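-- pv_equiv track=rewrite | github.com/janek37/advent-of-code | day08.py | viewing_distance_from_direction
-- ===== SOURCE A (Python) =====
-- from typing import Iterable, List, Tuple, Set
--
-- def viewing_distance(height, row: Iterable[int]) -> int:
--     dist = 0
--     for tree in row:
--         dist += 1
--         if tree >= height:
--             break
--     return dist
--
-- def viewing_distance_from_direction(trees: List[List[int]], x: int, y: int, horizontal: bool, reverse: bool) -> int:
--     step = -1 if reverse else 1
--     height = trees[y][x]
--     if horizontal:
--         return viewing_distance(height, trees[y][x+step::step])
--     else:  # vertical
--         column = [row[x] for row in trees]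
--         return viewing_distance(height, column[y+step::step])
-- ===== SOURCE B (Python) =====
-- def viewing_distance_from_direction(trees, x, y, horizontal, reverse):
--     step = -1 if reverse else 1
--     height = trees[y][x]
--     count = 0
--     if horizontal:
--         limit = len(trees[y])
--         i = (x + limit if x < 0 else x) + step
--         while 0 <= i < limit:
--             count += 1
--             if trees[y][i] >= height:
--                 break
--             i += step
--     else:
--         limit = len(trees)
--         i = (y + limit if y < 0 else y) + step
--         while 0 <= i < limit:
--             count += 1
--             if trees[i][x] >= height:
--                 break
--             i += step
--     return count
-- ===== Notes on version B (the rewrite author's own statement) =====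
-- stated objective: simpler
-- what changed: Collapses A's helper-plus-slice structure (directional slice / materialized column comprehension fed to a separate viewing_distance helper) into a single function that walks grid indices directly with a counter, never building the slice or the column.
-- intended difference: On lookups off the grid edge along the traversed axis (reverse=True with x=0 horizontal / y=0 vertical, or reverse=False with x=-1 / y=-1), A's slice start wraps to the opposite edge and it scans the whole reversed row/column returning a positive count, while B returns 0, the intended viewing distance of an edge tree looking off the grid. — e.g. on viewing_distance_from_direction([[5, 3]], 0, 0, true, true): A returns 2, B returns 0
import Mathlib
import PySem

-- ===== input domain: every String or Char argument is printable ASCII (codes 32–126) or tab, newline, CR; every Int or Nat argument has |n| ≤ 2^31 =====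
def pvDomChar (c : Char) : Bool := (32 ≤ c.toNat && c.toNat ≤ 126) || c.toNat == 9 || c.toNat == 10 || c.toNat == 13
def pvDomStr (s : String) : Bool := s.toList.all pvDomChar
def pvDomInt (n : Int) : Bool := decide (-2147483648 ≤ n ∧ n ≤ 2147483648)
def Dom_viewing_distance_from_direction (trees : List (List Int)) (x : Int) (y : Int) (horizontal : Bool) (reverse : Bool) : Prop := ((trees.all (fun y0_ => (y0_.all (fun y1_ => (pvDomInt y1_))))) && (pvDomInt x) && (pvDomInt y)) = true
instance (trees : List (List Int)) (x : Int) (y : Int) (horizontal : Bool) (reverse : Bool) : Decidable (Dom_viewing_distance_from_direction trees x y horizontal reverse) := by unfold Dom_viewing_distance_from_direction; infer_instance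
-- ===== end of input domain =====

-- B collapses A's helper-plus-slice structure into one index-walking loop (no slice, no column list);
-- on the reverse-from-edge inputs (x=0 horizontal / y=0 vertical with reverse) A's slice wraps to the
-- far edge and returns a positive count, while B returns the intended 0 (stated as D_ below).


-- ===== PORT A =====
-- helper viewing_distance: for-loop with break, as structural recursion over the row
def pv_viewing_distance (height : Int) : List Int → Int
  | [] => 0
  | t :: ts => if height ≤ t then 1 else 1 + pv_viewing_distance height ts

def viewing_distance_from_direction (trees : List (List Int)) (x : Int) (y : Int) (horizontal : Bool) (reverse : Bool) : Int :=
  let step : Int := if reverse then -1 else 1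
  let height : Int := PySem.List.pyGetD (PySem.List.pyGetD trees y []) x 0
  if horizontal then
    pv_viewing_distance height
      ((PySem.List.slice? (PySem.List.pyGetD trees y []) (some (x + step)) none step).getD [])
  else
    let column : List Int := trees.map (fun row => PySem.List.pyGetD row x 0)
    pv_viewing_distance height
      ((PySem.List.slice? column (some (y + step)) none step).getD [])

-- ===== PORT B =====
-- B's while loop: step an index from the start position while it stays in [0, limit);
-- fuel = limit+1 bounds the loop (the index moves one step per iteration inside [0, limit))
def pv_walk (look : Int → Int) (height : Int) (limit : Int) (step : Int) : Nat → Int → Int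
  | 0, _ => 0
  | fuel + 1, i =>
    if 0 ≤ i ∧ i < limit then
      (if height ≤ look i then 1 else 1 + pv_walk look height limit step fuel (i + step))
    else 0

def viewing_distance_from_direction_alt (trees : List (List Int)) (x : Int) (y : Int) (horizontal : Bool) (reverse : Bool) : Int :=
  let step : Int := if reverse then -1 else 1
  let height : Int := PySem.List.pyGetD (PySem.List.pyGetD trees y []) x 0
  if horizontal then
    let limit : Int := (PySem.List.pyGetD trees y []).length
    pv_walk (fun i => PySem.List.pyGetD (PySem.List.pyGetD trees y []) i 0) height limit step
      (limit.toNat + 1) ((if x < 0 then x + limit else x) + step)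
  else
    let limit : Int := trees.length
    pv_walk (fun i => PySem.List.pyGetD (PySem.List.pyGetD trees i []) x 0) height limit step
      (limit.toNat + 1) ((if y < 0 then y + limit else y) + step)

-- ===== PRECONDITION & SPEC =====
-- Pre_ excludes exactly the inputs on which Python A raises IndexError: y outside [-len(trees), len(trees))
-- and, for the axis actually indexed, x outside the Python index range of the row (horizontal) or of some
-- row (vertical: the column comprehension indexes every row).
def Pre_viewing_distance_from_direction (trees : List (List Int)) (x : Int) (y : Int) (horizontal : Bool) (reverse : Bool) : Prop :=
  -(trees.length : Int) ≤ y ∧ y < trees.length ∧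
    (if horizontal then
       -((PySem.List.pyGetD trees y []).length : Int) ≤ x ∧ x < ((PySem.List.pyGetD trees y []).length : Int)
     else ∀ row ∈ trees, -(row.length : Int) ≤ x ∧ x < (row.length : Int))
instance (trees : List (List Int)) (x : Int) (y : Int) (horizontal : Bool) (reverse : Bool) : Decidable (Pre_viewing_distance_from_direction trees x y horizontal reverse) := by unfold Pre_viewing_distance_from_direction; infer_instance

def pvWitness_viewing_distance_from_direction : List (List Int) × Int × Int × Bool × Bool := ([[3, 1, 2]], 1, 0, true, true)

-- Looking outward past the grid edge (reverse from index 0, or forward from index -1, on the traversed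
-- axis) A's slice start wraps to the OPPOSITE edge and it scans the whole row/column, returning a positive
-- count, while B returns 0 — the intended viewing distance of an edge tree looking off the grid.
def D_viewing_distance_from_direction (trees : List (List Int)) (x : Int) (y : Int) (horizontal : Bool) (reverse : Bool) : Prop :=
  (reverse = true ∧ ((horizontal = true ∧ x = 0) ∨ (horizontal = false ∧ y = 0)))
  ∨ (reverse = false ∧ ((horizontal = true ∧ x = -1) ∨ (horizontal = false ∧ y = -1)))
instance (trees : List (List Int)) (x : Int) (y : Int) (horizontal : Bool) (reverse : Bool) : Decidable (D_viewing_distance_from_direction trees x y horizontal reverse) := by unfold D_viewing_distance_from_direction; infer_instance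

def Spec_viewing_distance_from_direction (trees : List (List Int)) (x : Int) (y : Int) (horizontal : Bool) (reverse : Bool) (out : Int) : Prop := ¬ D_viewing_distance_from_direction trees x y horizontal reverse → out = viewing_distance_from_direction_alt trees x y horizontal reverse
instance (trees : List (List Int)) (x : Int) (y : Int) (horizontal : Bool) (reverse : Bool) (out : Int) : Decidable (Spec_viewing_distance_from_direction trees x y horizontal reverse out) := by unfold Spec_viewing_distance_from_direction; infer_instance

def pvDiffWitness_viewing_distance_from_direction : List (List Int) × Int × Int × Bool × Bool := ([[5, 3]], 0, 0, true, true)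
def pvDiffWitnessOut_viewing_distance_from_direction : Int × Int := (2, 0)

-- ===== CLAIM (what is proved, stated in full; the proofs are below) =====
def Claim_unchanged_viewing_distance_from_direction : Prop := ∀ (trees : List (List Int)) (x : Int) (y : Int) (horizontal : Bool) (reverse : Bool), Dom_viewing_distance_from_direction trees x y horizontal reverse → Pre_viewing_distance_from_direction trees x y horizontal reverse → Spec_viewing_distance_from_direction trees x y horizontal reverse (viewing_distance_from_direction trees x y horizontal reverse)
def Claim_changed_viewing_distance_from_direction : Prop := Dom_viewing_distance_from_direction (pvDiffWitness_viewing_distance_from_direction.1) (pvDiffWitness_viewing_distance_from_direction.2.1) (pvDiffWitness_viewing_distance_from_direction.2.2.1) (pvDiffWitness_viewing_distance_from_direction.2.2.2.1) (pvDiffWitness_viewing_distance_from_direction.2.2.2.2) ∧ Pre_viewing_distance_from_direction (pvDiffWitness_viewing_distance_from_direction.1) (pvDiffWitness_viewing_distance_from_direction.2.1) (pvDiffWitness_viewing_distance_from_direction.2.2.1) (pvDiffWitness_viewing_distance_from_direction.2.2.2.1) (pvDiffWitness_viewing_distance_from_direction.2.2.2.2) ∧ D_viewing_distance_from_direction (pvDiffWitness_viewing_distance_from_direction.1)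 (pvDiffWitness_viewing_distance_from_direction.2.1) (pvDiffWitness_viewing_distance_from_direction.2.2.1) (pvDiffWitness_viewing_distance_from_direction.2.2.2.1) (pvDiffWitness_viewing_distance_from_direction.2.2.2.2) ∧ viewing_distance_from_direction (pvDiffWitness_viewing_distance_from_direction.1) (pvDiffWitness_viewing_distance_from_direction.2.1) (pvDiffWitness_viewing_distance_from_direction.2.2.1) (pvDiffWitness_viewing_distance_from_direction.2.2.2.1) (pvDiffWitness_viewing_distance_from_direction.2.2.2.2) = pvDiffWitnessOut_viewing_distance_from_direction.1 ∧ viewing_distance_from_direction_alt (pvDiffWitness_viewing_distance_from_direction.1) (pvDiffWitness_viewing_distance_from_direction.2.1) (pvDiffWitness_viewing_distance_from_direction.2.2.1) (pvDiffWitness_viewing_distance_from_direction.2.2.2.1) (pvDiffWitness_viewing_distance_from_direction.2.2.2.2) = pvDiffWitnessOut_viewing_distance_from_direction.2 ∧ pvDiffWitnessOut_viewing_distance_from_direction.1 ≠ pvDiffWitnessOut_viewing_distance_from_direction.2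
def Claim_exact_viewing_distance_from_direction : Prop := ∀ (trees : List (List Int)) (x : Int) (y : Int) (horizontal : Bool) (reverse : Bool), Dom_viewing_distance_from_direction trees x y horizontal reverse → Pre_viewing_distance_from_direction trees x y horizontal reverse → D_viewing_distance_from_direction trees x y horizontal reverse → viewing_distance_from_direction trees x y horizontal reverse ≠ viewing_distance_from_direction_alt trees x y horizontal reverse

-- ===== LEMMAS AND PROOFS =====

theorem fm_fwd (xs : List Int) (s : Nat) :
    List.filterMap (fun k : Nat => xs[((s:Int) + (k:Int)).toNat]?) (List.range (xs.length - s))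
      = xs.drop s := by
  have hmap : ∀ k ∈ List.range (xs.length - s),
      xs[((s:Int) + (k:Int)).toNat]? = some (xs.getD (s+k) 0) := by
    intro k hk
    simp only [List.mem_range] at hk
    have h1 : ((s:Int) + (k:Int)).toNat = s + k := by omega
    rw [h1, List.getElem?_eq_getElem (by omega), List.getD_eq_getElem _ _ (by omega)]
  rw [List.filterMap_congr hmap]
  rw [show (fun x => some (xs.getD (s + x) 0)) = (some ∘ fun x => xs.getD (s + x) 0) from rfl, List.filterMap_eq_map]
  apply List.ext_getElem
  · simp
  · intro i h1 h2
    simp at h1 h2 ⊢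
    rw [List.getElem?_eq_getElem (show s+i < xs.length by omega)]
    rfl

theorem fm_bwd (xs : List Int) (s : Nat) (hs : s < xs.length) :
    List.filterMap (fun k : Nat => xs[((s:Int) + -1 * (k:Int)).toNat]?) (List.range (s+1))
      = (xs.take (s+1)).reverse := by
  have hmap : ∀ k ∈ List.range (s+1),
      xs[((s:Int) + -1 * (k:Int)).toNat]? = some (xs.getD (s-k) 0) := by
    intro k hk
    simp only [List.mem_range] at hk
    have h1 : ((s:Int) + -1 * (k:Int)).toNat = s - k := by omega
    rw [h1, List.getElem?_eq_getElem (by omega), List.getD_eq_getElem _ _ (by omega)]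
  rw [List.filterMap_congr hmap]
  rw [show (fun x => some (xs.getD (s - x) 0)) = (some ∘ fun x => xs.getD (s - x) 0) from rfl, List.filterMap_eq_map]
  apply List.ext_getElem
  · simp; omega
  · intro i h1 h2
    simp at h1 h2 ⊢
    rw [List.getElem?_eq_getElem (show s-i < xs.length by omega)]
    simp only [Option.getD_some]
    congr 1
    omega

theorem slice?_fwd (xs : List Int) (a : Int) (ha : 0 ≤ a) :
    PySem.List.slice? xs (some a) none 1 = some (xs.drop a.toNat) := by
  simp only [PySem.List.slice?, PySem.List.sliceIndices]
  norm_num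
  by_cases hle : a ≤ (xs.length : Int)
  · have h1 : (if a < 0 then max (a + ↑xs.length) 0 else min a ↑xs.length) = ((a.toNat : Int)) := by
      omega
    rw [h1]
    by_cases hlt : ((a.toNat : Int)) < (xs.length : Int)
    · rw [if_pos hlt]
      have h2 : ((xs.length : Int) - (a.toNat : Int)).toNat = xs.length - a.toNat := by omega
      rw [h2]
      have := fm_fwd xs a.toNat
      simpa using this
    · rw [if_neg hlt]
      simp [List.drop_eq_nil_of_le (by omega : xs.length ≤ a.toNat)]
  · have h1 : (if a < 0 then max (a + ↑xs.length) 0 else min a ↑xs.length) = (xs.length : Int) := by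
      omega
    rw [h1]
    simp [List.drop_eq_nil_of_le (by omega : xs.length ≤ a.toNat)]

theorem slice?_bwd (xs : List Int) (a : Int) (ha : 0 ≤ a) (ha2 : a < xs.length) :
    PySem.List.slice? xs (some a) none (-1) = some ((xs.take (a.toNat + 1)).reverse) := by
  simp only [PySem.List.slice?, PySem.List.sliceIndices]
  norm_num
  have h1 : (if a < 0 then max (a + ↑xs.length) (-1) else min a (↑xs.length - 1)) = ((a.toNat : Int)) := by
    omega
  rw [h1]
  have h2 : (-1 : Int) < (a.toNat : Int) := by omega
  rw [if_pos h2]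
  have h3 : ((a.toNat : Int) + 1).toNat = a.toNat + 1 := by omega
  rw [h3]
  have := fm_bwd xs a.toNat (by omega)
  simpa using this

theorem slice?_bwd_neg_one (xs : List Int) (h : xs ≠ []) :
    PySem.List.slice? xs (some (-1)) none (-1) = some xs.reverse := by
  have hlen : 1 ≤ xs.length := by cases xs <;> simp_all
  obtain ⟨n, hn⟩ : ∃ n, xs.length = n + 1 := ⟨xs.length - 1, by omega⟩
  simp only [PySem.List.slice?, PySem.List.sliceIndices]
  norm_num
  rw [if_pos (by omega : 0 < xs.length)]
  have hfun : (fun x : Nat => xs[(-1 + (xs.length:Int) + -(x:Int)).toNat]?)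
      = (fun k : Nat => xs[(((n:Nat):Int) + -1*(k:Int)).toNat]?) := by
    funext k; congr 1; omega
  rw [hfun, show xs.length = n + 1 from hn, fm_bwd xs n (by omega)]
  rw [show n + 1 = xs.length from hn.symm, List.take_length]



theorem pv_walk_out (look : Int → Int) (h l st : Int) (fuel : Nat) (i : Int)
    (hi : ¬ (0 ≤ i ∧ i < l)) : pv_walk look h l st fuel i = 0 := by
  cases fuel <;> simp [pv_walk, hi]

theorem pv_vd_pos (h : Int) (xs : List Int) (hne : xs ≠ []) : 1 ≤ pv_viewing_distance h xs := by
  cases xs with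
  | nil => simp_all
  | cons t ts =>
    simp only [pv_viewing_distance]
    split
    · omega
    · have : 0 ≤ pv_viewing_distance h ts := by
        clear hne
        induction ts with
        | nil => simp [pv_viewing_distance]
        | cons a as ihh => simp only [pv_viewing_distance]; split <;> omega
      omega

theorem walk_fwd (xs : List Int) (look : Int → Int) (h : Int)
    (hl : ∀ k : Nat, k < xs.length → look k = xs.getD k 0) :
    ∀ (fuel i : Nat), xs.length ≤ fuel + i →
      pv_walk look h xs.length 1 fuel i = pv_viewing_distance h (xs.drop i) := by
  intro fuel
  induction fuel with
  | zero =>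
    intro i hi
    simp [pv_walk, List.drop_eq_nil_of_le (by omega : xs.length ≤ i), pv_viewing_distance]
  | succ f ih =>
    intro i hi
    by_cases hcase : i < xs.length
    · have hin : (0:Int) ≤ (i:Int) ∧ (i:Int) < (xs.length:Int) := by
        constructor <;> omega
      simp only [pv_walk, if_pos hin]
      rw [hl i hcase, List.getD_eq_getElem _ _ hcase,
        List.drop_eq_getElem_cons hcase]
      simp only [pv_viewing_distance]
      split
      · rfl
      · rw [show (i:Int) + 1 = ((i+1 : Nat) : Int) from by omega, ih (i+1) (by omega)]
    · rw [pv_walk_out look h _ _ _ _ (by intro hc; omega),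
        List.drop_eq_nil_of_le (by omega : xs.length ≤ i)]
      rfl

theorem walk_bwd (xs : List Int) (look : Int → Int) (h : Int)
    (hl : ∀ k : Nat, k < xs.length → look k = xs.getD k 0) :
    ∀ (fuel k : Nat), k < fuel → k < xs.length →
      pv_walk look h xs.length (-1) fuel (k : Int) = pv_viewing_distance h ((xs.take (k + 1)).reverse) := by
  intro fuel k
  induction k generalizing fuel with
  | zero =>
    intro hf hk
    obtain ⟨f, rfl⟩ : ∃ f, fuel = f + 1 := ⟨fuel - 1, by omega⟩
    have hin : (0:Int) ≤ ((0:Nat):Int) ∧ ((0:Nat):Int) < (xs.length:Int) := by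
      constructor <;> omega
    simp only [pv_walk]
    rw [if_pos hin, hl 0 hk, List.getD_eq_getElem _ _ hk]
    have htake : xs.take 1 = [xs[0]] := by
      cases xs with
      | nil => simp at hk
      | cons a as => simp
    rw [htake]
    have hneg : pv_walk look h (xs.length:Int) (-1) f (((0:Nat):Int) + -1) = 0 :=
      pv_walk_out _ _ _ _ _ _ (by intro hc; obtain ⟨hc1, hc2⟩ := hc; omega)
    rw [hneg]
    simp only [List.reverse_singleton, pv_viewing_distance]
  | succ n ih =>
    intro hf hk
    obtain ⟨f, rfl⟩ : ∃ f, fuel = f + 1 := ⟨fuel - 1, by omega⟩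
    have hin : (0:Int) ≤ ((n+1:Nat):Int) ∧ ((n+1:Nat):Int) < (xs.length:Int) := by
      constructor <;> omega
    simp only [pv_walk]
    rw [if_pos hin, hl (n+1) hk, List.getD_eq_getElem _ _ hk]
    have htake : xs.take (n + 1 + 1) = xs.take (n + 1) ++ [xs[n+1]] := by
      rw [List.take_add_one, List.getElem?_eq_getElem hk]
      rfl
    rw [htake, List.reverse_append]
    simp only [List.reverse_singleton, List.singleton_append, pv_viewing_distance]
    split
    · rfl
    · rw [show ((n+1:Nat):Int) + -1 = ((n:Nat):Int) from by omega, ih f (by omega) (by omega)]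


theorem slice?_fwd_neg (xs : List Int) (a : Int) (h1 : -(xs.length : Int) ≤ a) (h2 : a < 0) :
    PySem.List.slice? xs (some a) none 1 = some (xs.drop (a + xs.length).toNat) := by
  simp only [PySem.List.slice?, PySem.List.sliceIndices]
  norm_num
  have h1' : (if a < 0 then max (a + (xs.length:Int)) 0 else min a (xs.length:Int))
      = (((a + xs.length).toNat : Nat) : Int) := by omega
  rw [h1', if_pos (by omega : (((a + xs.length).toNat : Nat) : Int) < (xs.length:Int))]
  have h2' : ((xs.length : Int) - (((a + xs.length).toNat : Nat) : Int)).toNat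
      = xs.length - (a + xs.length).toNat := by omega
  rw [h2']
  have := fm_fwd xs (a + xs.length).toNat
  simpa using this

theorem slice?_bwd_negStart (xs : List Int) (a : Int) (h1 : -(xs.length : Int) ≤ a) (h2 : a < 0) :
    PySem.List.slice? xs (some a) none (-1) = some ((xs.take ((a + xs.length).toNat + 1)).reverse) := by
  simp only [PySem.List.slice?, PySem.List.sliceIndices]
  norm_num
  have h1' : (if a < 0 then max (a + (xs.length:Int)) (-1) else min a ((xs.length:Int) - 1))
      = (((a + xs.length).toNat : Nat) : Int) := by omega
  rw [h1', if_pos (by omega : (-1:Int) < (((a + xs.length).toNat : Nat) : Int))]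
  have h3 : ((((a + xs.length).toNat : Nat) : Int) + 1).toNat = (a + xs.length).toNat + 1 := by omega
  rw [h3]
  have := fm_bwd xs (a + xs.length).toNat (by omega)
  simpa using this

theorem slice?_bwd_empty (xs : List Int) (a : Int) (h1 : a + xs.length < 0) :
    PySem.List.slice? xs (some a) none (-1) = some [] := by
  simp only [PySem.List.slice?, PySem.List.sliceIndices]
  norm_num
  have h1' : (if a < 0 then max (a + (xs.length:Int)) (-1) else min a ((xs.length:Int) - 1))
      = (-1 : Int) := by omega
  rw [h1', if_neg (by omega : ¬ (-1:Int) < (-1:Int))]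
  simp

-- the agreeing direction cases: slice characterization on A's side, walk lemma on B's side
theorem case_horiz_fwd (trees : List (List Int)) (x y : Int)
    (hge : -((PySem.List.pyGetD trees y []).length : Int) ≤ x)
    (hlt : x < ((PySem.List.pyGetD trees y []).length : Int)) (hne : x ≠ -1) :
    viewing_distance_from_direction trees x y true false
      = viewing_distance_from_direction_alt trees x y true false := by
  show pv_viewing_distance (PySem.List.pyGetD (PySem.List.pyGetD trees y []) x 0)
      ((PySem.List.slice? (PySem.List.pyGetD trees y []) (some (x + 1)) none 1).getD [])
    = pv_walk (fun i => PySem.List.pyGetD (PySem.List.pyGetD trees y []) i 0)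
        (PySem.List.pyGetD (PySem.List.pyGetD trees y []) x 0)
        ((PySem.List.pyGetD trees y []).length : Int) 1
        (((PySem.List.pyGetD trees y []).length : Int).toNat + 1)
        ((if x < 0 then x + ((PySem.List.pyGetD trees y []).length : Int) else x) + 1)
  set row := PySem.List.pyGetD trees y [] with hrow
  by_cases hx : 0 ≤ x
  · rw [if_neg (by omega), slice?_fwd row (x + 1) (by omega), Option.getD_some, Int.toNat_natCast,
      show (x + 1 : Int) = (((x + 1).toNat : Nat) : Int) from by omega,
      walk_fwd row _ _ (by intro k hk; simp [PySem.List.pyGetD_natCast]) (row.length + 1)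
        ((x + 1).toNat) (by omega),
      show ((((x + 1).toNat : Nat) : Int)).toNat = (x + 1).toNat from by omega]
  · rw [if_pos (by omega), slice?_fwd_neg row (x + 1) (by omega) (by omega), Option.getD_some,
      Int.toNat_natCast,
      show (x + (row.length : Int) + 1 : Int) = (((x + 1 + (row.length : Int)).toNat : Nat) : Int) from by omega,
      walk_fwd row _ _ (by intro k hk; simp [PySem.List.pyGetD_natCast]) (row.length + 1)
        ((x + 1 + (row.length : Int)).toNat) (by omega)]

theorem case_horiz_bwd (trees : List (List Int)) (x y : Int)
    (hge : -((PySem.List.pyGetD trees y []).length : Int) ≤ x)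
    (hlt : x < ((PySem.List.pyGetD trees y []).length : Int)) (hne : x ≠ 0) :
    viewing_distance_from_direction trees x y true true
      = viewing_distance_from_direction_alt trees x y true true := by
  show pv_viewing_distance (PySem.List.pyGetD (PySem.List.pyGetD trees y []) x 0)
      ((PySem.List.slice? (PySem.List.pyGetD trees y []) (some (x + -1)) none (-1)).getD [])
    = pv_walk (fun i => PySem.List.pyGetD (PySem.List.pyGetD trees y []) i 0)
        (PySem.List.pyGetD (PySem.List.pyGetD trees y []) x 0)
        ((PySem.List.pyGetD trees y []).length : Int) (-1)
        (((PySem.List.pyGetD trees y []).length : Int).toNat + 1)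
        ((if x < 0 then x + ((PySem.List.pyGetD trees y []).length : Int) else x) + -1)
  set row := PySem.List.pyGetD trees y [] with hrow
  by_cases hx : 1 ≤ x
  · rw [if_neg (by omega), slice?_bwd row (x + -1) (by omega) (by omega), Option.getD_some,
      Int.toNat_natCast,
      show (x + -1 : Int) = (((x + -1).toNat : Nat) : Int) from by omega,
      walk_bwd row _ _ (by intro k hk; simp [PySem.List.pyGetD_natCast]) (row.length + 1)
        ((x + -1).toNat) (by omega) (by omega),
      show ((((x + -1).toNat : Nat) : Int)).toNat = (x + -1).toNat from by omega]
  · by_cases hxe : -((row.length : Int)) + 1 ≤ x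
    · rw [if_pos (by omega), slice?_bwd_negStart row (x + -1) (by omega) (by omega), Option.getD_some,
        Int.toNat_natCast,
        show (x + (row.length : Int) + -1 : Int) = (((x + -1 + (row.length : Int)).toNat : Nat) : Int) from by omega,
        walk_bwd row _ _ (by intro k hk; simp [PySem.List.pyGetD_natCast]) (row.length + 1)
          ((x + -1 + (row.length : Int)).toNat) (by omega) (by omega)]
    · rw [if_pos (by omega), slice?_bwd_empty row (x + -1) (by omega), Option.getD_some,
        pv_walk_out _ _ _ _ _ _ (by intro hc; obtain ⟨hc1, hc2⟩ := hc; omega)]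
      rfl

theorem col_look (trees : List (List Int)) (x : Int) :
    ∀ k : Nat, k < (trees.map (fun row => PySem.List.pyGetD row x 0)).length →
      (fun i => PySem.List.pyGetD (PySem.List.pyGetD trees i []) x 0) (k : Int)
        = (trees.map (fun row => PySem.List.pyGetD row x 0)).getD k 0 := by
  intro k hk
  have hk' : k < trees.length := by simpa using hk
  simp only [PySem.List.pyGetD_natCast]
  rw [List.getD_eq_getElem trees [] hk', List.getD_eq_getElem _ 0 hk, List.getElem_map]

theorem case_vert_fwd (trees : List (List Int)) (x y : Int)
    (hge : -(trees.length : Int) ≤ y) (hlt : y < (trees.length : Int)) (hne : y ≠ -1) :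
    viewing_distance_from_direction trees x y false false
      = viewing_distance_from_direction_alt trees x y false false := by
  show pv_viewing_distance (PySem.List.pyGetD (PySem.List.pyGetD trees y []) x 0)
      ((PySem.List.slice? (trees.map (fun row => PySem.List.pyGetD row x 0)) (some (y + 1)) none 1).getD [])
    = pv_walk (fun i => PySem.List.pyGetD (PySem.List.pyGetD trees i []) x 0)
        (PySem.List.pyGetD (PySem.List.pyGetD trees y []) x 0)
        (trees.length : Int) 1 ((trees.length : Int).toNat + 1)
        ((if y < 0 then y + (trees.length : Int) else y) + 1)
  set column := trees.map (fun row => PySem.List.pyGetD row x 0) with hcol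
  have hlen : column.length = trees.length := by simp [hcol]
  rw [show (trees.length : Int) = (column.length : Int) from by rw [hlen]] at *
  by_cases hy : 0 ≤ y
  · rw [if_neg (by omega), slice?_fwd column (y + 1) (by omega), Option.getD_some, Int.toNat_natCast,
      show (y + 1 : Int) = (((y + 1).toNat : Nat) : Int) from by omega,
      walk_fwd column _ _ (col_look trees x) (column.length + 1) ((y + 1).toNat) (by omega),
      show ((((y + 1).toNat : Nat) : Int)).toNat = (y + 1).toNat from by omega]
  · rw [if_pos (by omega), slice?_fwd_neg column (y + 1) (by omega) (by omega), Option.getD_some,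
      Int.toNat_natCast,
      show (y + (column.length : Int) + 1 : Int) = (((y + 1 + (column.length : Int)).toNat : Nat) : Int) from by omega,
      walk_fwd column _ _ (col_look trees x) (column.length + 1)
        ((y + 1 + (column.length : Int)).toNat) (by omega)]

theorem case_vert_bwd (trees : List (List Int)) (x y : Int)
    (hge : -(trees.length : Int) ≤ y) (hlt : y < (trees.length : Int)) (hne : y ≠ 0) :
    viewing_distance_from_direction trees x y false true
      = viewing_distance_from_direction_alt trees x y false true := by
  show pv_viewing_distance (PySem.List.pyGetD (PySem.List.pyGetD trees y []) x 0)
      ((PySem.List.slice? (trees.map (fun row => PySem.List.pyGetD row x 0)) (some (y + -1)) none (-1)).getD [])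
    = pv_walk (fun i => PySem.List.pyGetD (PySem.List.pyGetD trees i []) x 0)
        (PySem.List.pyGetD (PySem.List.pyGetD trees y []) x 0)
        (trees.length : Int) (-1) ((trees.length : Int).toNat + 1)
        ((if y < 0 then y + (trees.length : Int) else y) + -1)
  set column := trees.map (fun row => PySem.List.pyGetD row x 0) with hcol
  have hlen : column.length = trees.length := by simp [hcol]
  rw [show (trees.length : Int) = (column.length : Int) from by rw [hlen]] at *
  by_cases hy : 1 ≤ y
  · rw [if_neg (by omega), slice?_bwd column (y + -1) (by omega) (by omega), Option.getD_some,
      Int.toNat_natCast,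
      show (y + -1 : Int) = (((y + -1).toNat : Nat) : Int) from by omega,
      walk_bwd column _ _ (col_look trees x) (column.length + 1) ((y + -1).toNat) (by omega) (by omega),
      show ((((y + -1).toNat : Nat) : Int)).toNat = (y + -1).toNat from by omega]
  · by_cases hye : -((column.length : Int)) + 1 ≤ y
    · rw [if_pos (by omega), slice?_bwd_negStart column (y + -1) (by omega) (by omega), Option.getD_some,
        Int.toNat_natCast,
        show (y + (column.length : Int) + -1 : Int) = (((y + -1 + (column.length : Int)).toNat : Nat) : Int) from by omega,
        walk_bwd column _ _ (col_look trees x) (column.length + 1)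
          ((y + -1 + (column.length : Int)).toNat) (by omega) (by omega)]
    · rw [if_pos (by omega), slice?_bwd_empty column (y + -1) (by omega), Option.getD_some,
        pv_walk_out _ _ _ _ _ _ (by intro hc; obtain ⟨hc1, hc2⟩ := hc; omega)]
      rfl

-- ===== VERDICT (by name: the statement is the Claim_ definition above) =====
theorem viewing_distance_from_direction_spec : Claim_unchanged_viewing_distance_from_direction := by
  intro trees x y horizontal reverse hdom hpre hnd
  obtain ⟨hyge, hylt, hbranch⟩ := hpre
  cases horizontal with
  | true =>
    obtain ⟨hxge, hxlt⟩ : -((PySem.List.pyGetD trees y []).length : Int) ≤ x ∧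
        x < ((PySem.List.pyGetD trees y []).length : Int) := by simpa using hbranch
    cases reverse with
    | false =>
      have hne : x ≠ -1 := by
        intro hx; exact hnd (Or.inr ⟨rfl, Or.inl ⟨rfl, hx⟩⟩)
      exact case_horiz_fwd trees x y hxge hxlt hne
    | true =>
      have hne : x ≠ 0 := by
        intro hx; exact hnd (Or.inl ⟨rfl, Or.inl ⟨rfl, hx⟩⟩)
      exact case_horiz_bwd trees x y hxge hxlt hne
  | false =>
    cases reverse with
    | false =>
      have hne : y ≠ -1 := by
        intro hy; exact hnd (Or.inr ⟨rfl, Or.inr ⟨rfl, hy⟩⟩)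
      exact case_vert_fwd trees x y hyge hylt hne
    | true =>
      have hne : y ≠ 0 := by
        intro hy; exact hnd (Or.inl ⟨rfl, Or.inr ⟨rfl, hy⟩⟩)
      exact case_vert_bwd trees x y hyge hylt hne

theorem viewing_distance_from_direction_changed : Claim_changed_viewing_distance_from_direction := by
  unfold Claim_changed_viewing_distance_from_direction; decide

theorem viewing_distance_from_direction_tight : Claim_exact_viewing_distance_from_direction := by
  intro trees x y horizontal reverse hdom hpre hd
  obtain ⟨hyge, hylt, hbranch⟩ := hpre
  rcases hd with ⟨hrev, ⟨hh, hx⟩ | ⟨hh, hy⟩⟩ | ⟨hrev, ⟨hh, hx⟩ | ⟨hh, hy⟩⟩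
  -- reverse from x = 0 (horizontal)
  · subst hrev; subst hh; subst hx
    have hrlen : 0 < (PySem.List.pyGetD trees y []).length := by
      have := (by simpa using hbranch : -((PySem.List.pyGetD trees y []).length : Int) ≤ (0:Int) ∧
        (0:Int) < ((PySem.List.pyGetD trees y []).length : Int))
      omega
    have hA : 1 ≤ viewing_distance_from_direction trees 0 y true true := by
      show 1 ≤ pv_viewing_distance (PySem.List.pyGetD (PySem.List.pyGetD trees y []) 0 0)
        ((PySem.List.slice? (PySem.List.pyGetD trees y []) (some ((0:Int) + -1)) none (-1)).getD [])
      rw [show ((0:Int) + -1) = (-1 : Int) from by norm_num,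
        slice?_bwd_neg_one _ (by intro hnil; rw [hnil] at hrlen; simp at hrlen),
        Option.getD_some]
      exact pv_vd_pos _ _ (by simp; intro hnil; rw [hnil] at hrlen; simp at hrlen)
    have hB : viewing_distance_from_direction_alt trees 0 y true true = 0 := by
      show pv_walk (fun i => PySem.List.pyGetD (PySem.List.pyGetD trees y []) i 0)
        (PySem.List.pyGetD (PySem.List.pyGetD trees y []) 0 0)
        ((PySem.List.pyGetD trees y []).length : Int) (-1)
        (((PySem.List.pyGetD trees y []).length : Int).toNat + 1)
        ((if (0:Int) < 0 then (0:Int) + ((PySem.List.pyGetD trees y []).length : Int) else (0:Int)) + -1) = 0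
      rw [if_neg (by norm_num)]
      exact pv_walk_out _ _ _ _ _ _ (by intro hc; obtain ⟨hc1, hc2⟩ := hc; omega)
    omega
  -- reverse from y = 0 (vertical)
  · subst hrev; subst hh; subst hy
    have htlen : 0 < trees.length := by omega
    have hA : 1 ≤ viewing_distance_from_direction trees x 0 false true := by
      show 1 ≤ pv_viewing_distance (PySem.List.pyGetD (PySem.List.pyGetD trees 0 []) x 0)
        ((PySem.List.slice? (trees.map (fun row => PySem.List.pyGetD row x 0)) (some ((0:Int) + -1)) none (-1)).getD [])
      rw [show ((0:Int) + -1) = (-1 : Int) from by norm_num,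
        slice?_bwd_neg_one _ (by simp; intro hnil; rw [hnil] at htlen; simp at htlen),
        Option.getD_some]
      apply pv_vd_pos
      simp
      intro hnil; rw [hnil] at htlen; simp at htlen
    have hB : viewing_distance_from_direction_alt trees x 0 false true = 0 := by
      show pv_walk (fun i => PySem.List.pyGetD (PySem.List.pyGetD trees i []) x 0)
        (PySem.List.pyGetD (PySem.List.pyGetD trees 0 []) x 0)
        (trees.length : Int) (-1) ((trees.length : Int).toNat + 1)
        ((if (0:Int) < 0 then (0:Int) + (trees.length : Int) else (0:Int)) + -1) = 0
      rw [if_neg (by norm_num)]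
      exact pv_walk_out _ _ _ _ _ _ (by intro hc; obtain ⟨hc1, hc2⟩ := hc; omega)
    omega
  -- forward from x = -1 (horizontal)
  · subst hrev; subst hh; subst hx
    have hrlen : 0 < (PySem.List.pyGetD trees y []).length := by
      have := (by simpa using hbranch : -((PySem.List.pyGetD trees y []).length : Int) ≤ (-1:Int) ∧
        (-1:Int) < ((PySem.List.pyGetD trees y []).length : Int))
      omega
    have hA : 1 ≤ viewing_distance_from_direction trees (-1) y true false := by
      show 1 ≤ pv_viewing_distance (PySem.List.pyGetD (PySem.List.pyGetD trees y []) (-1) 0)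
        ((PySem.List.slice? (PySem.List.pyGetD trees y []) (some ((-1:Int) + 1)) none 1).getD [])
      rw [show ((-1:Int) + 1) = (0 : Int) from by norm_num,
        slice?_fwd _ 0 (by norm_num), Option.getD_some]
      simp only [Int.toNat_zero, List.drop_zero]
      exact pv_vd_pos _ _ (by intro hnil; rw [hnil] at hrlen; simp at hrlen)
    have hB : viewing_distance_from_direction_alt trees (-1) y true false = 0 := by
      show pv_walk (fun i => PySem.List.pyGetD (PySem.List.pyGetD trees y []) i 0)
        (PySem.List.pyGetD (PySem.List.pyGetD trees y []) (-1) 0)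
        ((PySem.List.pyGetD trees y []).length : Int) 1
        (((PySem.List.pyGetD trees y []).length : Int).toNat + 1)
        ((if (-1:Int) < 0 then (-1:Int) + ((PySem.List.pyGetD trees y []).length : Int) else (-1:Int)) + 1) = 0
      rw [if_pos (by norm_num)]
      exact pv_walk_out _ _ _ _ _ _ (by intro hc; obtain ⟨hc1, hc2⟩ := hc; omega)
    omega
  -- forward from y = -1 (vertical)
  · subst hrev; subst hh; subst hy
    have htlen : 0 < trees.length := by omega
    have hA : 1 ≤ viewing_distance_from_direction trees x (-1) false false := by
      show 1 ≤ pv_viewing_distance (PySem.List.pyGetD (PySem.List.pyGetD trees (-1) []) x 0)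
        ((PySem.List.slice? (trees.map (fun row => PySem.List.pyGetD row x 0)) (some ((-1:Int) + 1)) none 1).getD [])
      rw [show ((-1:Int) + 1) = (0 : Int) from by norm_num,
        slice?_fwd _ 0 (by norm_num), Option.getD_some]
      simp only [Int.toNat_zero, List.drop_zero]
      apply pv_vd_pos
      simp
      intro hnil; rw [hnil] at htlen; simp at htlen
    have hB : viewing_distance_from_direction_alt trees x (-1) false false = 0 := by
      show pv_walk (fun i => PySem.List.pyGetD (PySem.List.pyGetD trees i []) x 0)
        (PySem.List.pyGetD (PySem.List.pyGetD trees (-1) []) x 0)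
        (trees.length : Int) 1 ((trees.length : Int).toNat + 1)
        ((if (-1:Int) < 0 then (-1:Int) + (trees.length : Int) else (-1:Int)) + 1) = 0
      rw [if_pos (by norm_num)]
      exact pv_walk_out _ _ _ _ _ _ (by intro hc; obtain ⟨hc1, hc2⟩ := hc; omega)
    omega
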